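-- pv_equiv track=rewrite | github.com/bartoszpiechnik25/PythonPolskiSPOJ | FCTRL3 - Dwie cyfry silni .py | dwie_cyfry
-- ===== SOURCE A (Python) =====
-- def dwie_cyfry(a):
--     var = 1
--     if a < 10:
--         for i in range(1, a + 1):
--             var *= i
--         if a < 4:
--             return [0] + [var]
--         else:
--             return [(var // 10) % 10] + [var % 10]
--     else:
--         return [0] + [0]
-- ===== SOURCE B (Python) =====
-- _TABLE = {2: [0, 2], 3: [0, 6], 4: [2, 4], 5: [2, 0],
--           6: [2, 0], 7: [4, 0], 8: [2, 0], 9: [8, 0]}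
--
-- def dwie_cyfry(a):
--     if a >= 10:
--         return [0, 0]
--     if a < 2:
--         return [0, 1]
--     return list(_TABLE[a])
-- ===== Notes on version B (the rewrite author's own statement) =====
-- stated objective: simpler
-- what changed: Replaces the iterative factorial product and digit extraction with two range checks and a small constant lookup table for the remaining values.
import Mathlib
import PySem

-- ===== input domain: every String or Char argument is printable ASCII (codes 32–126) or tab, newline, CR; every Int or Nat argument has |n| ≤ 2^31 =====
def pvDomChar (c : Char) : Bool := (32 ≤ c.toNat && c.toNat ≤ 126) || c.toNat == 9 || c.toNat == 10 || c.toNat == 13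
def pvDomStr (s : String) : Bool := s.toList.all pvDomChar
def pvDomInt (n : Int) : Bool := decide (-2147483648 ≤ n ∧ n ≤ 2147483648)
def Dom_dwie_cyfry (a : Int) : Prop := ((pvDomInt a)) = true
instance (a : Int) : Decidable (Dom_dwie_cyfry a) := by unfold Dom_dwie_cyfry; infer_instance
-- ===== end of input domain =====

-- B replaces A's factorial loop + digit extraction with two range checks and a constant lookup table (simpler).

-- ===== PORT A =====
def dwie_cyfry (a : Int) : List Int :=
  let var : Int := 1
  if a < 10 then
    let var := (PySem.List.pyRange 1 (a + 1) 1).foldl (fun v i => v * i) var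
    if a < 4 then
      [0] ++ [var]
    else
      [(PySem.Int.floordiv var 10) % 10] ++ [var % 10]
  else
    [0] ++ [0]

-- ===== PORT B =====
def pvTable : PySem.Dict Int (List Int) :=
  PySem.Dict.ofList [(2, [0, 2]), (3, [0, 6]), (4, [2, 4]), (5, [2, 0]),
   (6, [2, 0]), (7, [4, 0]), (8, [2, 0]), (9, [8, 0])]

def dwie_cyfry_alt (a : Int) : List Int :=
  if a ≥ 10 then [0, 0]
  else if a < 2 then [0, 1]
  else (PySem.Dict.get? pvTable a).getD []

-- ===== PRECONDITION & SPEC =====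
def Spec_dwie_cyfry (a : Int) (out : List Int) : Prop := out = dwie_cyfry_alt a
instance (a : Int) (out : List Int) : Decidable (Spec_dwie_cyfry a out) := by unfold Spec_dwie_cyfry; infer_instance

-- ===== CLAIM (what is proved, stated in full; the proofs are below) =====
def Claim_equal_dwie_cyfry : Prop := ∀ (a : Int), Dom_dwie_cyfry a → Spec_dwie_cyfry a (dwie_cyfry a)

-- ===== LEMMAS AND PROOFS =====
-- For a ≤ 0, Python's range(1, a+1) is empty.
theorem pyRange_empty_of_nonpos (a : Int) (h : a ≤ 0) :
    PySem.List.pyRange 1 (a + 1) 1 = [] := by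
  rw [PySem.List.pyRange_one]
  have h0 : (a + 1 - 1).toNat = 0 := by omega
  simp only [h0, List.range_zero, List.map_nil]

-- ===== VERDICT (by name: the statement is the Claim_ definition above) =====
theorem dwie_cyfry_spec : Claim_equal_dwie_cyfry := by
  intro a _
  unfold Spec_dwie_cyfry
  by_cases h10 : a < 10
  · by_cases h2 : a < 2
    · by_cases h0 : a ≤ 0
      · have hr := pyRange_empty_of_nonpos a h0
        have h1 : ¬ a ≥ 10 := by omega
        simp [dwie_cyfry, dwie_cyfry_alt, hr, h10, h2, h1]
      · have : a = 1 := by omega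
        subst this
        simp [dwie_cyfry, dwie_cyfry_alt, PySem.List.pyRange_one, List.range_succ]
    · interval_cases a <;>
        simp [dwie_cyfry, dwie_cyfry_alt, pvTable, PySem.List.pyRange_one,
              PySem.Int.floordiv, PySem.Dict.get?, List.range_succ] <;> decide
  · have : a ≥ 10 := by omega
    simp [dwie_cyfry, dwie_cyfry_alt, h10, this]
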